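-- pv_equiv track=rewrite | github.com/err0r4eve3/heat-drought-rice-modeling | src/remote_sensing.py | _identify_spatiotemporal_coords
-- ===== SOURCE A (Python) =====
-- def _identify_spatiotemporal_coords(names: list[str]) -> dict[str, str]:
--     """Identify common time, latitude, and longitude coordinate names."""
--
--     normalized = {_normalize_name(name): name for name in names}
--     candidates = {
--         "time": ["time", "valid_time"],
--         "lat": ["lat", "latitude", "y"],
--         "lon": ["lon", "longitude", "x"],
--     }
--     mapping: dict[str, str] = {}
--     for role, role_candidates in candidates.items():
--         for candidate in role_candidates:
--             matched = normalized.get(_normalize_name(candidate))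
--             if matched is not None:
--                 mapping[role] = matched
--                 break
--     return mapping
--
-- def _normalize_name(name: str) -> str:
--     """Normalize names for coarse matching."""
--
--     return str(name).strip().lower().replace("_", "").replace("-", "").replace(" ", "")
-- ===== SOURCE B (Python) =====
-- _CANDIDATES = {
--     "time": ["time", "valid_time"],
--     "lat": ["lat", "latitude", "y"],
--     "lon": ["lon", "longitude", "x"],
-- }
--
--
-- def _normalize_name(name: str) -> str:
--     return str(name).strip().lower().replace("_", "").replace("-", "").replace(" ", "")
--
--
-- # Inverted index: normalized candidate -> (role, priority within the role's list).
-- _INDEX = {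
--     _normalize_name(cand): (role, priority)
--     for role, cands in _CANDIDATES.items()
--     for priority, cand in enumerate(cands)
-- }
--
--
-- def _identify_spatiotemporal_coords(names: list[str]) -> dict[str, str]:
--     # One pass over names: keep, per role, the best (lowest-priority) match;
--     # '<=' makes the LAST name win on equal priority, like A's dict overwrite.
--     best: dict[str, tuple[int, str]] = {}
--     for name in names:
--         hit = _INDEX.get(_normalize_name(name))
--         if hit is None:
--             continue
--         role, priority = hit
--         if role not in best or priority <= best[role][0]:
--             best[role] = (priority, name)
--     return {role: best[role][1] for role in _CANDIDATES if role in best}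
-- ===== Notes on version B (the rewrite author's own statement) =====
-- stated objective: alternative
-- what changed: A builds a dict of all normalized names and then scans each role's candidate list against it; B builds a fixed inverted index (normalized candidate -> role and priority) once and makes a single pass over the names, keeping the best-priority (last-wins on ties) match per role.
import Mathlib
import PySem

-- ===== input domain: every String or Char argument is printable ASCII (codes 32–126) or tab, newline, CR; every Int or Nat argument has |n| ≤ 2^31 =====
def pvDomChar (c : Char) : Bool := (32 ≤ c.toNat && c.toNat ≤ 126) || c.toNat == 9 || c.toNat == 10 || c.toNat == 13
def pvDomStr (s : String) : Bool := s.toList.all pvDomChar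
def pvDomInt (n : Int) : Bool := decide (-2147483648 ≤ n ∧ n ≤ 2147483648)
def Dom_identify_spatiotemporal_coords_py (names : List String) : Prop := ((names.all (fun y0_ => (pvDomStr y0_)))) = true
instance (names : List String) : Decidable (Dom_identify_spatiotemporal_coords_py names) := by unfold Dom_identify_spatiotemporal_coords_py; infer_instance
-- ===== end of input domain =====

-- B replaces A's per-role candidate scans over a dict of all names by a fixed inverted index and a
-- single pass over `names` tracking the best-priority match per role (objective: alternative decomposition).

-- ===== PORT A =====
def pvNorm (name : String) : String :=
  PySem.Str.replace (PySem.Str.replace (PySem.Str.replace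
    (PySem.Str.lower (PySem.Str.strip name)) "_" "") "-" "") " " ""

def pvCandidatesA : List (String × List String) :=
  [("time", ["time", "valid_time"]),
   ("lat", ["lat", "latitude", "y"]),
   ("lon", ["lon", "longitude", "x"])]

-- the inner 'for candidate in role_candidates: … break' loop of A
def pvRoleLoop (normalized : PySem.Dict String String) (mapping : PySem.Dict String String)
    (role : String) : List String → PySem.Dict String String
  | [] => mapping
  | c :: cs =>
    match normalized.get? (pvNorm c) with
    | some matched => mapping.insert role matched
    | none => pvRoleLoop normalized mapping role cs

def identify_spatiotemporal_coords_py (names : List String) : List (String × String) :=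
  let normalized := names.foldl (fun d name => d.insert (pvNorm name) name) PySem.Dict.empty
  (pvCandidatesA.foldl (fun mapping rc => pvRoleLoop normalized mapping rc.1 rc.2)
    PySem.Dict.empty).items

-- ===== PORT B =====
def pvCandidatesB : List (String × List String) :=
  [("time", ["time", "valid_time"]),
   ("lat", ["lat", "latitude", "y"]),
   ("lon", ["lon", "longitude", "x"])]

-- _INDEX: normalized candidate -> (role, priority)
def pvIndex : PySem.Dict String (String × Int) :=
  pvCandidatesB.foldl
    (fun d rc => (PySem.List.enumerate rc.2).foldl
      (fun d' pc => d'.insert (pvNorm pc.2) (rc.1, pc.1)) d)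
    PySem.Dict.empty

-- one iteration of B's single pass over names
def pvBStep (best : PySem.Dict String (Int × String)) (name : String) :
    PySem.Dict String (Int × String) :=
  match pvIndex.get? (pvNorm name) with
  | none => best
  | some rp =>
    match best.get? rp.1 with
    | none => best.insert rp.1 (rp.2, name)
    | some pn => if rp.2 ≤ pn.1 then best.insert rp.1 (rp.2, name) else best

def identify_spatiotemporal_coords_py_alt (names : List String) : List (String × String) :=
  let best := names.foldl pvBStep PySem.Dict.empty
  (pvCandidatesB.foldl
    (fun m rc =>
      match best.get? rc.1 with
      | some pn => m.insert rc.1 pn.2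
      | none => m)
    PySem.Dict.empty).items

-- ===== PRECONDITION & SPEC =====
def Spec_identify_spatiotemporal_coords_py (names : List String) (out : List (String × String)) : Prop := out = identify_spatiotemporal_coords_py_alt names
instance (names : List String) (out : List (String × String)) : Decidable (Spec_identify_spatiotemporal_coords_py names out) := by unfold Spec_identify_spatiotemporal_coords_py; infer_instance

-- ===== CLAIM (what is proved, stated in full; the proofs are below) =====
def Claim_equal_identify_spatiotemporal_coords_py : Prop := ∀ (names : List String), Dom_identify_spatiotemporal_coords_py names → Spec_identify_spatiotemporal_coords_py names (identify_spatiotemporal_coords_py names)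

-- ===== LEMMAS AND PROOFS =====

-- Invariant tying A's normalized-name dict to one role's entry of B's best dict:
-- no entry ↔ no candidate of the role matched so far; an entry (p, nm) ↔ candidate #p is the
-- first matched candidate of the role and nm is the (last-wins) name stored for its key.
def RoleInv (cs : List String) (d : PySem.Dict String String) (b : Option (Int × String)) : Prop :=
  match b with
  | none => ∀ c ∈ cs, d.get? (pvNorm c) = none
  | some pn => ∃ i : Nat, pn.1 = (i : Int) ∧ ∃ c, cs[i]? = some c ∧
      d.get? (pvNorm c) = some pn.2 ∧
      ∀ j : Nat, j < i → ∀ c', cs[j]? = some c' → d.get? (pvNorm c') = none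

def RelAll (d : PySem.Dict String String) (bd : PySem.Dict String (Int × String)) : Prop :=
  RoleInv ["time", "valid_time"] d (bd.get? "time") ∧
  RoleInv ["lat", "latitude", "y"] d (bd.get? "lat") ∧
  RoleInv ["lon", "longitude", "x"] d (bd.get? "lon")

-- the shape of B's per-role update, factored out for the proofs
def pvUpd (bd : PySem.Dict String (Int × String)) (role : String) (p : Int) (n : String) :
    PySem.Dict String (Int × String) :=
  match bd.get? role with
  | none => bd.insert role (p, n)
  | some pn => if p ≤ pn.1 then bd.insert role (p, n) else bd

-- the effect of pvUpd on the updated role's entry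
def pvUpdOpt (b : Option (Int × String)) (p : Int) (n : String) : Option (Int × String) :=
  match b with
  | none => some (p, n)
  | some pn => if p ≤ pn.1 then some (p, n) else some pn

lemma bstep_eq (bd : PySem.Dict String (Int × String)) (n : String) (rp : String × Int)
    (h : pvIndex.get? (pvNorm n) = some rp) : pvBStep bd n = pvUpd bd rp.1 rp.2 n := by
  unfold pvBStep pvUpd
  rw [h]

lemma bstep_eq_none (bd : PySem.Dict String (Int × String)) (n : String)
    (h : pvIndex.get? (pvNorm n) = none) : pvBStep bd n = bd := by
  unfold pvBStep
  rw [h]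

lemma upd_get_self (bd : PySem.Dict String (Int × String)) (role : String) (p : Int) (n : String) :
    (pvUpd bd role p n).get? role = pvUpdOpt (bd.get? role) p n := by
  unfold pvUpd pvUpdOpt
  rcases h : bd.get? role with _ | pn
  · simp [PySem.Dict.get?_insert_self]
  · dsimp only
    split_ifs
    · simp [PySem.Dict.get?_insert_self]
    · exact h

lemma upd_get_other (bd : PySem.Dict String (Int × String)) (role r' : String) (p : Int)
    (n : String) (h : r' ≠ role) : (pvUpd bd role p n).get? r' = bd.get? r' := by
  unfold pvUpd
  rcases bd.get? role with _ | pn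
  · simp [PySem.Dict.get?_insert_of_ne _ _ h]
  · dsimp only
    split_ifs
    · simp [PySem.Dict.get?_insert_of_ne _ _ h]
    · rfl

lemma inv_insert_notmem (cs : List String) (d : PySem.Dict String String)
    (b : Option (Int × String)) (k : String) (v : String)
    (hk : k ∉ cs.map pvNorm) (hinv : RoleInv cs d b) : RoleInv cs (d.insert k v) b := by
  have hne : ∀ c, c ∈ cs → pvNorm c ≠ k := by
    intro c hc h
    exact hk (h ▸ List.mem_map_of_mem (f := pvNorm) hc)
  cases b with
  | none =>
    intro c hc
    rw [PySem.Dict.get?_insert_of_ne _ _ (hne c hc)]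
    exact hinv c hc
  | some pn =>
    obtain ⟨i, hp, c, hci, hd, hprev⟩ := hinv
    refine ⟨i, hp, c, hci, ?_, ?_⟩
    · rw [PySem.Dict.get?_insert_of_ne _ _ (hne c (List.mem_of_getElem? hci))]
      exact hd
    · intro j hj c' hc'
      rw [PySem.Dict.get?_insert_of_ne _ _ (hne c' (List.mem_of_getElem? hc'))]
      exact hprev j hj c' hc'

lemma inv_insert_at (cs : List String) (d : PySem.Dict String String)
    (b : Option (Int × String)) (i : Nat) (c n : String)
    (hnd : (cs.map pvNorm).Nodup) (hc : cs[i]? = some c) (hinv : RoleInv cs d b) :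
    RoleInv cs (d.insert (pvNorm c) n) (pvUpdOpt b (i : Int) n) := by
  have hlen : i < cs.length := (List.getElem?_eq_some_iff.mp hc).1
  have hci : cs[i] = c := by simpa [List.getElem?_eq_getElem hlen] using hc
  have hne_of_ne : ∀ j : Nat, (hjl : j < cs.length) → j ≠ i → pvNorm cs[j] ≠ pvNorm c := by
    intro j hjl hji heq
    have hmj : (cs.map pvNorm)[j]'(by simpa using hjl) =
        (cs.map pvNorm)[i]'(by simpa using hlen) := by
      simp [hci, heq]
    exact hji ((List.Nodup.getElem_inj_iff hnd).mp hmj)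
  cases b with
  | none =>
    refine ⟨i, rfl, c, hc, PySem.Dict.get?_insert_self .., ?_⟩
    intro j hj c' hc'
    have hjl : j < cs.length := lt_trans hj hlen
    have hc'' : cs[j] = c' := by simpa [List.getElem?_eq_getElem hjl] using hc'
    rw [PySem.Dict.get?_insert_of_ne _ _ (hc'' ▸ hne_of_ne j hjl (Nat.ne_of_lt hj))]
    exact hinv c' (List.mem_of_getElem? hc')
  | some pn =>
    obtain ⟨i0, hp, c0, hc0, hd0, hprev⟩ := hinv
    simp only [pvUpdOpt]
    by_cases hle : (i : Int) ≤ pn.1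
    · rw [if_pos hle]
      refine ⟨i, rfl, c, hc, PySem.Dict.get?_insert_self .., ?_⟩
      intro j hj c' hc'
      have hjl : j < cs.length := lt_trans hj hlen
      have hc'' : cs[j] = c' := by simpa [List.getElem?_eq_getElem hjl] using hc'
      rw [PySem.Dict.get?_insert_of_ne _ _ (hc'' ▸ hne_of_ne j hjl (Nat.ne_of_lt hj))]
      have hji0 : j < i0 := by
        rw [hp] at hle
        have hii0 : i ≤ i0 := by exact_mod_cast hle
        omega
      exact hprev j hji0 c' hc'
    · rw [if_neg hle]
      have hi0l : i0 < cs.length := (List.getElem?_eq_some_iff.mp hc0).1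
      have hc0' : cs[i0] = c0 := by simpa [List.getElem?_eq_getElem hi0l] using hc0
      have hii0 : i0 ≠ i := by
        intro h; apply hle; rw [hp, h]
      refine ⟨i0, hp, c0, hc0, ?_, ?_⟩
      · rw [PySem.Dict.get?_insert_of_ne _ _ (hc0' ▸ hne_of_ne i0 hi0l hii0)]
        exact hd0
      · intro j hj c' hc'
        have hjl : j < cs.length := lt_trans hj hi0l
        have hc'' : cs[j] = c' := by simpa [List.getElem?_eq_getElem hjl] using hc'
        have hji : j ≠ i := by
          intro h
          apply hle
          rw [hp, ← h]
          exact_mod_cast Nat.le_of_lt hj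
        rw [PySem.Dict.get?_insert_of_ne _ _ (hc'' ▸ hne_of_ne j hjl hji)]
        exact hprev j hj c' hc'

-- invariant preservation, matched role
lemma inv_upd_match (cs : List String) (d : PySem.Dict String String)
    (bd : PySem.Dict String (Int × String)) (role n c : String) (p : Int) (i : Nat)
    (hpi : p = (i : Int)) (hnd : (cs.map pvNorm).Nodup) (hc : cs[i]? = some c)
    (hn : pvNorm n = pvNorm c) (hinv : RoleInv cs d (bd.get? role)) :
    RoleInv cs (d.insert (pvNorm n) n) ((pvUpd bd role p n).get? role) := by
  rw [upd_get_self, hn, hpi]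
  exact inv_insert_at cs d (bd.get? role) i c n hnd hc hinv

-- invariant preservation, other roles
lemma inv_upd_other (cs : List String) (d : PySem.Dict String String)
    (bd : PySem.Dict String (Int × String)) (role r' n : String) (p : Int)
    (h : r' ≠ role) (hk : pvNorm n ∉ cs.map pvNorm) (hinv : RoleInv cs d (bd.get? r')) :
    RoleInv cs (d.insert (pvNorm n) n) ((pvUpd bd role p n).get? r') := by
  rw [upd_get_other _ _ _ _ _ h]
  exact inv_insert_notmem cs d _ _ n hk hinv

lemma relall_step (d : PySem.Dict String String) (bd : PySem.Dict String (Int × String))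
    (n : String) (h : RelAll d bd) :
    RelAll (d.insert (pvNorm n) n) (pvBStep bd n) := by
  obtain ⟨ht, hla, hlo⟩ := h
  by_cases h1 : pvNorm n = "time"
  · rw [bstep_eq bd n ("time", 0) (by rw [h1]; decide)]
    exact ⟨inv_upd_match _ d bd _ n "time" 0 0 (by norm_num) (by decide) (by decide) (h1.trans (by decide)) ht,
           inv_upd_other _ d bd _ _ n 0 (by decide) (by rw [h1]; decide) hla,
           inv_upd_other _ d bd _ _ n 0 (by decide) (by rw [h1]; decide) hlo⟩
  by_cases h2 : pvNorm n = "validtime"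
  · rw [bstep_eq bd n ("time", 1) (by rw [h2]; decide)]
    exact ⟨inv_upd_match _ d bd _ n "valid_time" 1 1 (by norm_num) (by decide) (by decide) (h2.trans (by decide)) ht,
           inv_upd_other _ d bd _ _ n 1 (by decide) (by rw [h2]; decide) hla,
           inv_upd_other _ d bd _ _ n 1 (by decide) (by rw [h2]; decide) hlo⟩
  by_cases h3 : pvNorm n = "lat"
  · rw [bstep_eq bd n ("lat", 0) (by rw [h3]; decide)]
    exact ⟨inv_upd_other _ d bd _ _ n 0 (by decide) (by rw [h3]; decide) ht,
           inv_upd_match _ d bd _ n "lat" 0 0 (by norm_num) (by decide) (by decide) (h3.trans (by decide)) hla,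
           inv_upd_other _ d bd _ _ n 0 (by decide) (by rw [h3]; decide) hlo⟩
  by_cases h4 : pvNorm n = "latitude"
  · rw [bstep_eq bd n ("lat", 1) (by rw [h4]; decide)]
    exact ⟨inv_upd_other _ d bd _ _ n 1 (by decide) (by rw [h4]; decide) ht,
           inv_upd_match _ d bd _ n "latitude" 1 1 (by norm_num) (by decide) (by decide) (h4.trans (by decide)) hla,
           inv_upd_other _ d bd _ _ n 1 (by decide) (by rw [h4]; decide) hlo⟩
  by_cases h5 : pvNorm n = "y"
  · rw [bstep_eq bd n ("lat", 2) (by rw [h5]; decide)]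
    exact ⟨inv_upd_other _ d bd _ _ n 2 (by decide) (by rw [h5]; decide) ht,
           inv_upd_match _ d bd _ n "y" 2 2 (by norm_num) (by decide) (by decide) (h5.trans (by decide)) hla,
           inv_upd_other _ d bd _ _ n 2 (by decide) (by rw [h5]; decide) hlo⟩
  by_cases h6 : pvNorm n = "lon"
  · rw [bstep_eq bd n ("lon", 0) (by rw [h6]; decide)]
    exact ⟨inv_upd_other _ d bd _ _ n 0 (by decide) (by rw [h6]; decide) ht,
           inv_upd_other _ d bd _ _ n 0 (by decide) (by rw [h6]; decide) hla,
           inv_upd_match _ d bd _ n "lon" 0 0 (by norm_num) (by decide) (by decide) (h6.trans (by decide)) hlo⟩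
  by_cases h7 : pvNorm n = "longitude"
  · rw [bstep_eq bd n ("lon", 1) (by rw [h7]; decide)]
    exact ⟨inv_upd_other _ d bd _ _ n 1 (by decide) (by rw [h7]; decide) ht,
           inv_upd_other _ d bd _ _ n 1 (by decide) (by rw [h7]; decide) hla,
           inv_upd_match _ d bd _ n "longitude" 1 1 (by norm_num) (by decide) (by decide) (h7.trans (by decide)) hlo⟩
  by_cases h8 : pvNorm n = "x"
  · rw [bstep_eq bd n ("lon", 2) (by rw [h8]; decide)]
    exact ⟨inv_upd_other _ d bd _ _ n 2 (by decide) (by rw [h8]; decide) ht,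
           inv_upd_other _ d bd _ _ n 2 (by decide) (by rw [h8]; decide) hla,
           inv_upd_match _ d bd _ n "x" 2 2 (by norm_num) (by decide) (by decide) (h8.trans (by decide)) hlo⟩
  · have hIdx : pvIndex = PySem.Dict.mk
      [("time", ("time", 0)), ("validtime", ("time", 1)),
       ("lat", ("lat", 0)), ("latitude", ("lat", 1)), ("y", ("lat", 2)),
       ("lon", ("lon", 0)), ("longitude", ("lon", 1)), ("x", ("lon", 2))] := by decide
    have hnone : pvIndex.get? (pvNorm n) = none := by
      simp [hIdx, PySem.Dict.get?_mk_cons,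
        Ne.symm h1, Ne.symm h2, Ne.symm h3, Ne.symm h4, Ne.symm h5, Ne.symm h6, Ne.symm h7,
        Ne.symm h8]
      rfl
    rw [bstep_eq_none bd n hnone]
    refine ⟨inv_insert_notmem _ d _ _ n ?_ ht, inv_insert_notmem _ d _ _ n ?_ hla,
      inv_insert_notmem _ d _ _ n ?_ hlo⟩
    · simp [show List.map pvNorm ["time", "valid_time"] = ["time", "validtime"] from by decide,
        h1, h2]
    · simp [show List.map pvNorm ["lat", "latitude", "y"] = ["lat", "latitude", "y"] from by decide,
        h3, h4, h5]
    · simp [show List.map pvNorm ["lon", "longitude", "x"] = ["lon", "longitude", "x"] from by decide,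
        h6, h7, h8]

lemma roleLoop_none (d : PySem.Dict String String) (m : PySem.Dict String String) (role : String)
    (cs : List String) (h : ∀ c ∈ cs, d.get? (pvNorm c) = none) :
    pvRoleLoop d m role cs = m := by
  induction cs with
  | nil => rfl
  | cons c cs ih =>
    simp only [pvRoleLoop, h c List.mem_cons_self]
    exact ih (fun c' hc' => h c' (List.mem_cons_of_mem _ hc'))

lemma roleLoop_some (d : PySem.Dict String String) (m : PySem.Dict String String) (role : String)
    (cs : List String) (i : Nat) (c nm : String)
    (hc : cs[i]? = some c) (hd : d.get? (pvNorm c) = some nm)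
    (hprev : ∀ j : Nat, j < i → ∀ c', cs[j]? = some c' → d.get? (pvNorm c') = none) :
    pvRoleLoop d m role cs = m.insert role nm := by
  induction cs generalizing i with
  | nil => simp at hc
  | cons c0 cs ih =>
    cases i with
    | zero =>
      simp only [List.getElem?_cons_zero, Option.some.injEq] at hc
      simp only [pvRoleLoop, hc, hd]
    | succ i' =>
      have h0 : d.get? (pvNorm c0) = none := hprev 0 (Nat.succ_pos _) c0 rfl
      simp only [pvRoleLoop, h0]
      exact ih i' (by simpa using hc) (fun j hj c' hc' =>
        hprev (j + 1) (Nat.succ_lt_succ hj) c' (by simpa using hc'))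

-- the value B's output loop inserts for one role
def pvMapIns (m : PySem.Dict String String) (role : String) (b : Option (Int × String)) :
    PySem.Dict String String :=
  match b with
  | none => m
  | some pn => m.insert role pn.2

lemma roleLoop_of_inv (d : PySem.Dict String String) (m : PySem.Dict String String) (role : String)
    (cs : List String) (b : Option (Int × String)) (hinv : RoleInv cs d b) :
    pvRoleLoop d m role cs = pvMapIns m role b := by
  cases b with
  | none => exact roleLoop_none d m role cs hinv
  | some pn =>
    obtain ⟨i, _, c, hc, hd, hprev⟩ := hinv
    exact roleLoop_some d m role cs i c pn.2 hc hd hprev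

lemma finish_eq (d : PySem.Dict String String) (bd : PySem.Dict String (Int × String))
    (h : RelAll d bd) :
    (pvCandidatesA.foldl (fun mapping rc => pvRoleLoop d mapping rc.1 rc.2)
      PySem.Dict.empty).items =
    (pvCandidatesB.foldl
      (fun m rc =>
        match bd.get? rc.1 with
        | some pn => m.insert rc.1 pn.2
        | none => m)
      PySem.Dict.empty).items := by
  obtain ⟨ht, hla, hlo⟩ := h
  simp only [pvCandidatesA, pvCandidatesB, List.foldl_cons, List.foldl_nil]
  rw [roleLoop_of_inv _ _ _ _ _ ht, roleLoop_of_inv _ _ _ _ _ hla,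
    roleLoop_of_inv _ _ _ _ _ hlo]
  unfold pvMapIns
  cases bd.get? "time" <;> cases bd.get? "lat" <;> cases bd.get? "lon" <;> rfl

lemma main_loop (names : List String) :
    ∀ (d : PySem.Dict String String) (bd : PySem.Dict String (Int × String)), RelAll d bd →
    (pvCandidatesA.foldl
      (fun mapping rc =>
        pvRoleLoop (names.foldl (fun d' name => d'.insert (pvNorm name) name) d) mapping rc.1 rc.2)
      PySem.Dict.empty).items =
    (pvCandidatesB.foldl
      (fun m rc =>
        match (names.foldl pvBStep bd).get? rc.1 with
        | some pn => m.insert rc.1 pn.2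
        | none => m)
      PySem.Dict.empty).items := by
  induction names with
  | nil => intro d bd h; simpa using finish_eq d bd h
  | cons n ns ih =>
    intro d bd h
    simp only [List.foldl_cons]
    exact ih _ _ (relall_step d bd n h)

-- ===== VERDICT (by name: the statement is the Claim_ definition above) =====
theorem identify_spatiotemporal_coords_py_spec : Claim_equal_identify_spatiotemporal_coords_py := by
  intro names _
  unfold Spec_identify_spatiotemporal_coords_py identify_spatiotemporal_coords_py
    identify_spatiotemporal_coords_py_alt
  exact main_loop names PySem.Dict.empty PySem.Dict.empty
    ⟨fun c _ => rfl, fun c _ => rfl, fun c _ => rfl⟩
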